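-- pv_equiv track=rewrite | github.com/YeferYV/bookgen | cognate_spanish/read_memrise.py | replace_spanish_letter
-- ===== SOURCE A (Python) =====
-- def replace_ipa(t):
--     t=t.replace("a","â")
--     t=t.replace("e","ê")
--     t=t.replace("o","ô")
--     t=t.replace("i","î")
--     t=t.replace("u","û")
--
--     t=t.replace("p","pʰ")#ƥ
--     t=t.replace("b","ɓ")
--     t=t.replace("t","ʈ")
--     t=t.replace("d","ɖ")
--     t=t.replace("k","kʰ")#Ʞʞ
--     t=t.replace("g","ɠ")
--     t=t.replace("m","ɱ")
--     t=t.replace("n","ɲ")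
--
--     t=t.replace("f","ʄ")
--     t=t.replace("v","ⱱ")
--     t=t.replace("s","ʂ")
--     t=t.replace("z","ʐ")
--     t=t.replace("h","ɦ")
--     t=t.replace("l","ɭ")
--     t=t.replace("j","ʝ")
--     t=t.replace("r","ɹ")
--     t=t.replace("y","ɣ")
--     t=t.replace("w","ɰ")
--     return t
--
-- def replace_letter(t1):
--     t=t1.replace("ch","Ç")
--     t=t.replace("h","")
--     t=t.replace("H","")
--     t=t.replace("; "," - ")
--     t=t.replace(" ","_")
--     t=t.replace("a","á")
--     t=t.replace("e","é")
--     t=t.replace("y ","í ")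
--     t=t.replace("i","í")
--     t=t.replace("o","ó")
--     t=t.replace("u","ú")
--     return t
--
-- def replace_spanish_letter(lines,ipa):
--     for k in range(1,len(lines),2):###impares=spanish
--         lines[k]="["+replace_letter(lines[k])+"]"
--
--     j=0
--     for k in range(0,len(lines),2):###pares=ingles
--         spelling=list(lines[k])
--         lines[k]="["+lines[k]+"] ["+"_".join(spelling)+"] "+" ".join(list(replace_ipa(ipa[j])))
--         j+=1
--
--     return lines
-- ===== SOURCE B (Python) =====
-- IPA = {"a": "â", "e": "ê", "o": "ô", "i": "î", "u": "û",
--        "p": "pʰ", "b": "ɓ", "t": "ʈ", "d": "ɖ", "k": "kʰ",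
--        "g": "ɠ", "m": "ɱ", "n": "ɲ",
--        "f": "ʄ", "v": "ⱱ", "s": "ʂ", "z": "ʐ", "h": "ɦ",
--        "l": "ɭ", "j": "ʝ", "r": "ɹ", "y": "ɣ", "w": "ɰ"}
--
-- VOWEL = {" ": "_", "a": "á", "e": "é", "i": "í", "o": "ó", "u": "ú"}
--
-- def _scan1(t):
--     # one left-to-right scan: 'ch' -> 'Ç' (with lookahead), drop 'h'/'H'
--     out = []
--     i = 0
--     n = len(t)
--     while i < n:
--         c = t[i]
--         if c == "c" and i + 1 < n and t[i + 1] == "h":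
--             out.append("Ç")
--             i += 2
--         elif c in ("h", "H"):
--             i += 1
--         else:
--             out.append(c)
--             i += 1
--     return out
--
-- def _scan2(cs):
--     # one scan over _scan1's output: '; '->'_-_' (lookahead), spaces and vowels
--     out = []
--     i = 0
--     n = len(cs)
--     while i < n:
--         c = cs[i]
--         if c == ";" and i + 1 < n and cs[i + 1] == " ":
--             out.append("_-_")
--             i += 2
--         else:
--             out.append(VOWEL.get(c, c))
--             i += 1
--     return "".join(out)
--
-- def _fix_spanish(t):
--     return _scan2(_scan1(t))
--
-- def _fmt_english(s, t):
--     return ("[" + s + "] [" + "_".join(s) + "] "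
--             + " ".join("".join(IPA.get(c, c) for c in t)))
--
-- def replace_spanish_letter(lines, ipa):
--     lines[:] = [_fmt_english(s, ipa[k // 2]) if k % 2 == 0
--                 else "[" + _fix_spanish(s) + "]"
--                 for k, s in enumerate(lines)]
--     return lines
-- ===== Notes on version B (the rewrite author's own statement) =====
-- stated objective: alternative
-- what changed: replace_letter's 11 staged full-string .replace passes become a two-stage left-to-right character automaton with one-char lookahead ('ch'->'Ç' and h/H-deletion in scan 1, '; '->'_-_' plus space/vowel mapping in scan 2, exploiting that the 'y ' stage is dead because all spaces are already '_'), replace_ipa's 23 staged passes become one dict-driven character map, and the driver's two in-place strided index loops with a j counter become a single enumerate comprehension building a new list from index parity.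
import Mathlib
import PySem

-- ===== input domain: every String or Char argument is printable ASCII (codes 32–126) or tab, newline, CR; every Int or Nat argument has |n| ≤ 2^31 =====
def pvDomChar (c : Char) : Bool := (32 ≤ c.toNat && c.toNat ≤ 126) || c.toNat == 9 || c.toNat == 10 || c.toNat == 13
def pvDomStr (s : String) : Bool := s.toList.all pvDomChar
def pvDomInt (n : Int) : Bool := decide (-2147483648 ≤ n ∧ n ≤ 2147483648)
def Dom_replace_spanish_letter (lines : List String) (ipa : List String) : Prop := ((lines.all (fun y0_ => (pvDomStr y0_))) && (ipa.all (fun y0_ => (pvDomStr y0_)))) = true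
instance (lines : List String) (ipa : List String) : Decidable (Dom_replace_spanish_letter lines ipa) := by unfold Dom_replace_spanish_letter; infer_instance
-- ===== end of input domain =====

-- B replaces the 11 staged full-string .replace passes of replace_letter by a
-- two-stage left-to-right character scanner with one-char lookahead, the 23
-- staged passes of replace_ipa by one dict-driven character map, and the
-- driver's two in-place strided index loops by one enumerate pass building a
-- new list from index parity; objective: alternative (same cost, one scan
-- instead of staged scans). A mutates `lines` in place; B performs the same
-- mutation (lines[:] = ...), and the theorems below are about the return value.

-- ===== PORT A =====
def replace_ipa (t : String) : String :=
  let t := PySem.Str.replace t "a" "â"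
  let t := PySem.Str.replace t "e" "ê"
  let t := PySem.Str.replace t "o" "ô"
  let t := PySem.Str.replace t "i" "î"
  let t := PySem.Str.replace t "u" "û"
  let t := PySem.Str.replace t "p" "pʰ"
  let t := PySem.Str.replace t "b" "ɓ"
  let t := PySem.Str.replace t "t" "ʈ"
  let t := PySem.Str.replace t "d" "ɖ"
  let t := PySem.Str.replace t "k" "kʰ"
  let t := PySem.Str.replace t "g" "ɠ"
  let t := PySem.Str.replace t "m" "ɱ"
  let t := PySem.Str.replace t "n" "ɲ"
  let t := PySem.Str.replace t "f" "ʄ"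
  let t := PySem.Str.replace t "v" "ⱱ"
  let t := PySem.Str.replace t "s" "ʂ"
  let t := PySem.Str.replace t "z" "ʐ"
  let t := PySem.Str.replace t "h" "ɦ"
  let t := PySem.Str.replace t "l" "ɭ"
  let t := PySem.Str.replace t "j" "ʝ"
  let t := PySem.Str.replace t "r" "ɹ"
  let t := PySem.Str.replace t "y" "ɣ"
  let t := PySem.Str.replace t "w" "ɰ"
  t

def replace_letter (t1 : String) : String :=
  let t := PySem.Str.replace t1 "ch" "Ç"
  let t := PySem.Str.replace t "h" ""
  let t := PySem.Str.replace t "H" ""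
  let t := PySem.Str.replace t "; " " - "
  let t := PySem.Str.replace t " " "_"
  let t := PySem.Str.replace t "a" "á"
  let t := PySem.Str.replace t "e" "é"
  let t := PySem.Str.replace t "y " "í "
  let t := PySem.Str.replace t "i" "í"
  let t := PySem.Str.replace t "o" "ó"
  let t := PySem.Str.replace t "u" "ú"
  t

def replace_spanish_letter (lines : List String) (ipa : List String) : List String :=
  -- for k in range(1, len(lines), 2): lines[k] = "[" + replace_letter(lines[k]) + "]"
  let lines1 := (PySem.List.pyRange 1 (lines.length : Int) 2).foldl
    (fun ls k => ls.set k.toNat ("[" ++ replace_letter (PySem.List.pyGetD ls k "") ++ "]")) lines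
  -- j = 0; for k in range(0, len(lines), 2): … ; j += 1   (ipa[j]: defaulted to "" outside Pre_, where Python raises IndexError)
  let st := (PySem.List.pyRange 0 (lines1.length : Int) 2).foldl
    (fun (st : List String × Int) k =>
      (st.1.set k.toNat
        ("[" ++ PySem.List.pyGetD st.1 k "" ++ "] ["
          ++ PySem.Str.join "_" ((PySem.List.pyGetD st.1 k "").toList.map String.singleton)
          ++ "] "
          ++ PySem.Str.join " " ((replace_ipa (PySem.List.pyGetD ipa st.2 "")).toList.map String.singleton)),
       st.2 + 1))
    (lines1, (0 : Int))
  st.1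

-- ===== PORT B =====
-- the IPA dict of Source B: each ASCII letter to its IPA string
def pvIpaTable : PySem.Dict Char String := PySem.Dict.ofList
  [('a', "â"), ('e', "ê"), ('o', "ô"), ('i', "î"), ('u', "û"),
   ('p', "pʰ"), ('b', "ɓ"), ('t', "ʈ"), ('d', "ɖ"), ('k', "kʰ"),
   ('g', "ɠ"), ('m', "ɱ"), ('n', "ɲ"),
   ('f', "ʄ"), ('v', "ⱱ"), ('s', "ʂ"), ('z', "ʐ"), ('h', "ɦ"),
   ('l', "ɭ"), ('j', "ʝ"), ('r', "ɹ"), ('y', "ɣ"), ('w', "ɰ")]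

-- "".join(IPA.get(c, c) for c in t): one pass, each char looked up in the dict
def pvTranslate (t : String) : String :=
  String.ofList (t.toList.flatMap
    (fun c => ((PySem.Dict.get? pvIpaTable c).getD (String.singleton c)).toList))

-- the VOWEL dict of Source B
def pvVowelTable : PySem.Dict Char String := PySem.Dict.ofList
  [(' ', "_"), ('a', "á"), ('e', "é"), ('i', "í"), ('o', "ó"), ('u', "ú")]

-- _scan1: one left-to-right scan, 'ch' -> 'Ç' with one-char lookahead, drop 'h'/'H'
def pvScan1 : List Char → List Char
  | [] => []
  | [c] => if c = 'h' ∨ c = 'H' then [] else [c]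
  | c :: d :: t =>
    if c = 'c' ∧ d = 'h' then 'Ç' :: pvScan1 t
    else if c = 'h' ∨ c = 'H' then pvScan1 (d :: t)
    else c :: pvScan1 (d :: t)

-- _scan2: one scan over _scan1's output, '; ' -> '_-_' with lookahead, VOWEL map
def pvScan2 : List Char → List Char
  | [] => []
  | [c] => ((PySem.Dict.get? pvVowelTable c).getD (String.singleton c)).toList
  | c :: d :: t =>
    if c = ';' ∧ d = ' ' then '_' :: '-' :: '_' :: pvScan2 t
    else ((PySem.Dict.get? pvVowelTable c).getD (String.singleton c)).toList ++ pvScan2 (d :: t)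

def pvFixSpanish (t : String) : String := String.ofList (pvScan2 (pvScan1 t.toList))

def pvFmtEnglish (s t : String) : String :=
  "[" ++ s ++ "] [" ++ PySem.Str.join "_" (s.toList.map String.singleton) ++ "] "
    ++ PySem.Str.join " " ((pvTranslate t).toList.map String.singleton)

-- the enumerate comprehension (ipa[k // 2]: defaulted to "" outside Pre_, where Python raises IndexError)
def replace_spanish_letter_alt (lines : List String) (ipa : List String) : List String :=
  (PySem.List.enumerate lines).map (fun p =>
    if PySem.Int.mod p.1 2 == 0 then
      pvFmtEnglish p.2 (PySem.List.pyGetD ipa (PySem.Int.floordiv p.1 2) "")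
    else "[" ++ pvFixSpanish p.2 ++ "]")

-- ===== PRECONDITION & SPEC =====
-- Pre_ excludes exactly the inputs where A raises IndexError: the second loop
-- reads ipa[j] for j = 0 .. ceil(len(lines)/2) - 1, so A returns iff
-- ceil(len(lines)/2) ≤ len(ipa), i.e. len(lines) ≤ 2*len(ipa).
def Pre_replace_spanish_letter (lines : List String) (ipa : List String) : Prop :=
  lines.length ≤ 2 * ipa.length
instance (lines : List String) (ipa : List String) : Decidable (Pre_replace_spanish_letter lines ipa) := by unfold Pre_replace_spanish_letter; infer_instance

def pvWitness_replace_spanish_letter : List String × List String := (["cat", "casa"], ["kat"])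

def Spec_replace_spanish_letter (lines : List String) (ipa : List String) (out : List String) : Prop := out = replace_spanish_letter_alt lines ipa
instance (lines : List String) (ipa : List String) (out : List String) : Decidable (Spec_replace_spanish_letter lines ipa out) := by unfold Spec_replace_spanish_letter; infer_instance

-- ===== CLAIM (what is proved, stated in full; the proofs are below) =====
def Claim_equal_replace_spanish_letter : Prop := ∀ (lines : List String) (ipa : List String), Dom_replace_spanish_letter lines ipa → Pre_replace_spanish_letter lines ipa → Spec_replace_spanish_letter lines ipa (replace_spanish_letter lines ipa)

-- ===== LEMMAS AND PROOFS =====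

-- Python str.replace with a single-character pattern is a per-character flatMap.
theorem pv_replace_go (c : Char) (r : List Char) :
    ∀ (fuel : Nat) (l acc : List Char), l.length ≤ fuel →
    PySem.Chars.replace.go [c] r fuel l acc
      = acc.reverse ++ l.flatMap (fun x => if x = c then r else [x]) := by
  intro fuel
  induction fuel with
  | zero =>
    intro l acc h
    have : l = [] := List.eq_nil_of_length_eq_zero (Nat.le_zero.mp h)
    subst this
    simp [PySem.Chars.replace.go]
  | succ n ih =>
    intro l acc h
    cases l with
    | nil => simp [PySem.Chars.replace.go]
    | cons c' t =>
      by_cases hc : c' = c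
      · subst hc
        have hpre : List.isPrefixOf [c'] (c' :: t) = true := by
          simp [List.isPrefixOf]
        rw [PySem.Chars.replace.go]
        simp only [hpre, if_true]
        rw [ih _ _ (by simpa using Nat.le_of_succ_le_succ h)]
        simp
      · have hpre : List.isPrefixOf [c] (c' :: t) = false := by
          simp [List.isPrefixOf]
          exact fun e => hc e.symm
        rw [PySem.Chars.replace.go]
        simp only [hpre]
        rw [ih _ _ (Nat.le_of_succ_le_succ h)]
        simp [hc]

theorem pv_replace_single (s : List Char) (c : Char) (r : List Char) :
    PySem.Chars.replace s [c] r = s.flatMap (fun x => if x = c then r else [x]) := by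
  have h := pv_replace_go c r s.length s [] le_rfl
  rw [PySem.Chars.replace]
  simpa using h

theorem pv_str_replace_single (s : String) (o : String) (r : String) (c : Char)
    (ho : o.toList = [c]) :
    (PySem.Str.replace s o r).toList
      = s.toList.flatMap (fun x => if x = c then r.toList else [x]) := by
  rw [PySem.Str.toList_replace, ho, pv_replace_single]

-- Python str.replace with a two-character pattern is a scan with one-char lookahead.
def pvRep2 (c1 c2 : Char) (r : List Char) : List Char → List Char
  | [] => []
  | [x] => [x]
  | x :: y :: t =>
    if x = c1 ∧ y = c2 then r ++ pvRep2 c1 c2 r t else x :: pvRep2 c1 c2 r (y :: t)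

theorem pv_rep2_go (c1 c2 : Char) (r : List Char) :
    ∀ (fuel : Nat) (l acc : List Char), l.length ≤ fuel →
    PySem.Chars.replace.go [c1, c2] r fuel l acc
      = acc.reverse ++ pvRep2 c1 c2 r l := by
  intro fuel
  induction fuel with
  | zero =>
    intro l acc h
    have : l = [] := List.eq_nil_of_length_eq_zero (Nat.le_zero.mp h)
    subst this
    simp [PySem.Chars.replace.go, pvRep2]
  | succ n ih =>
    intro l acc h
    match l with
    | [] => simp [PySem.Chars.replace.go, pvRep2]
    | [x] =>
      have hpre : List.isPrefixOf [c1, c2] [x] = false := by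
        simp [List.isPrefixOf]
      rw [PySem.Chars.replace.go]
      simp only [hpre]
      rw [ih [] (x :: acc) (by simp)]
      simp [pvRep2]
    | x :: y :: t =>
      by_cases hxy : x = c1 ∧ y = c2
      · obtain ⟨hx, hy⟩ := hxy
        subst hx; subst hy
        have hpre : List.isPrefixOf [x, y] (x :: y :: t) = true := by
          simp [List.isPrefixOf]
        rw [PySem.Chars.replace.go]
        simp only [hpre, if_true]
        rw [show List.drop (List.length [x, y]) (x :: y :: t) = t from rfl]
        rw [ih t (r.reverse ++ acc) (by simp at h ⊢; omega)]
        simp [pvRep2]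
      · have hpre : List.isPrefixOf [c1, c2] (x :: y :: t) = false := by
          simp only [List.isPrefixOf, Bool.and_eq_false_iff, beq_eq_false_iff_ne, ne_eq]
          by_cases hx : x = c1
          · subst hx
            right; left
            exact fun e => hxy ⟨rfl, e.symm⟩
          · left
            exact fun e => hx e.symm
        rw [PySem.Chars.replace.go]
        simp only [hpre]
        rw [ih (y :: t) (x :: acc) (by simpa using Nat.le_of_succ_le_succ h)]
        simp [pvRep2, hxy]

theorem pv_str_replace_two (s : String) (o : String) (r : String) (c1 c2 : Char)
    (ho : o.toList = [c1, c2]) :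
    (PySem.Str.replace s o r).toList = pvRep2 c1 c2 r.toList s.toList := by
  rw [PySem.Str.toList_replace, ho, PySem.Chars.replace]
  simpa using pv_rep2_go c1 c2 r.toList s.toList.length s.toList [] le_rfl

-- The 23-stage chain of per-character flatMaps, as one definition (proof helper).
def pvChainL (l : List Char) : List Char :=
  (((((((((((((((((((((((l).flatMap (fun x => if x = 'a' then ("â" : String).toList else [x])).flatMap (fun x => if x = 'e' then ("ê" : String).toList else [x])).flatMap (fun x => if x = 'o' then ("ô" : String).toList else [x])).flatMap (fun x => if x = 'i' then ("î" : String).toList else [x])).flatMap (fun x => if x = 'u' then ("û" : String).toList else [x])).flatMap (fun x => if x = 'p' then ("pʰ" : String).toList else [x])).flatMap (fun x => if x = 'b' then ("ɓ" : String).toList else [x])).flatMap (fun x => if x = 't' then ("ʈ" : String).toList else [x])).flatMap (fun x => if x = 'd' then ("ɖ" : String).toList else [x])).flatMap (fun x => if x = 'k' then ("kʰ" : String).toList else [x])).flatMap (fun x => if x = 'g' then ("ɠ" : String).toList else [x])).flatMap (fun x => if x = 'm' then ("ɱ" : String).toList else [x])).flatMap (fun x => if x = 'n' then ("ɲ" :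 String).toList else [x])).flatMap (fun x => if x = 'f' then ("ʄ" : String).toList else [x])).flatMap (fun x => if x = 'v' then ("ⱱ" : String).toList else [x])).flatMap (fun x => if x = 's' then ("ʂ" : String).toList else [x])).flatMap (fun x => if x = 'z' then ("ʐ" : String).toList else [x])).flatMap (fun x => if x = 'h' then ("ɦ" : String).toList else [x])).flatMap (fun x => if x = 'l' then ("ɭ" : String).toList else [x])).flatMap (fun x => if x = 'j' then ("ʝ" : String).toList else [x])).flatMap (fun x => if x = 'r' then ("ɹ" : String).toList else [x])).flatMap (fun x => if x = 'y' then ("ɣ" : String).toList else [x])).flatMap (fun x => if x = 'w' then ("ɰ" : String).toList else [x])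

theorem replace_ipa_toList_chain (s : String) :
    (replace_ipa s).toList = pvChainL s.toList := by
  rw [replace_ipa]
  rw [pv_str_replace_single _ "w" "ɰ" 'w' rfl]
  rw [pv_str_replace_single _ "y" "ɣ" 'y' rfl]
  rw [pv_str_replace_single _ "r" "ɹ" 'r' rfl]
  rw [pv_str_replace_single _ "j" "ʝ" 'j' rfl]
  rw [pv_str_replace_single _ "l" "ɭ" 'l' rfl]
  rw [pv_str_replace_single _ "h" "ɦ" 'h' rfl]
  rw [pv_str_replace_single _ "z" "ʐ" 'z' rfl]
  rw [pv_str_replace_single _ "s" "ʂ" 's' rfl]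
  rw [pv_str_replace_single _ "v" "ⱱ" 'v' rfl]
  rw [pv_str_replace_single _ "f" "ʄ" 'f' rfl]
  rw [pv_str_replace_single _ "n" "ɲ" 'n' rfl]
  rw [pv_str_replace_single _ "m" "ɱ" 'm' rfl]
  rw [pv_str_replace_single _ "g" "ɠ" 'g' rfl]
  rw [pv_str_replace_single _ "k" "kʰ" 'k' rfl]
  rw [pv_str_replace_single _ "d" "ɖ" 'd' rfl]
  rw [pv_str_replace_single _ "t" "ʈ" 't' rfl]
  rw [pv_str_replace_single _ "b" "ɓ" 'b' rfl]
  rw [pv_str_replace_single _ "p" "pʰ" 'p' rfl]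
  rw [pv_str_replace_single _ "u" "û" 'u' rfl]
  rw [pv_str_replace_single _ "i" "î" 'i' rfl]
  rw [pv_str_replace_single _ "o" "ô" 'o' rfl]
  rw [pv_str_replace_single _ "e" "ê" 'e' rfl]
  rw [pv_str_replace_single _ "a" "â" 'a' rfl]
  rfl

theorem pvChainL_append (l1 l2 : List Char) :
    pvChainL (l1 ++ l2) = pvChainL l1 ++ pvChainL l2 := by
  simp [pvChainL, List.flatMap_append]

theorem pvChainL_single (c : Char) :
    pvChainL [c] = ((PySem.Dict.get? pvIpaTable c).getD (String.singleton c)).toList := by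
  by_cases h0 : c = 'a'
  · subst h0; decide
  by_cases h1 : c = 'e'
  · subst h1; decide
  by_cases h2 : c = 'o'
  · subst h2; decide
  by_cases h3 : c = 'i'
  · subst h3; decide
  by_cases h4 : c = 'u'
  · subst h4; decide
  by_cases h5 : c = 'p'
  · subst h5; decide
  by_cases h6 : c = 'b'
  · subst h6; decide
  by_cases h7 : c = 't'
  · subst h7; decide
  by_cases h8 : c = 'd'
  · subst h8; decide
  by_cases h9 : c = 'k'
  · subst h9; decide
  by_cases h10 : c = 'g'
  · subst h10; decide
  by_cases h11 : c = 'm'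
  · subst h11; decide
  by_cases h12 : c = 'n'
  · subst h12; decide
  by_cases h13 : c = 'f'
  · subst h13; decide
  by_cases h14 : c = 'v'
  · subst h14; decide
  by_cases h15 : c = 's'
  · subst h15; decide
  by_cases h16 : c = 'z'
  · subst h16; decide
  by_cases h17 : c = 'h'
  · subst h17; decide
  by_cases h18 : c = 'l'
  · subst h18; decide
  by_cases h19 : c = 'j'
  · subst h19; decide
  by_cases h20 : c = 'r'
  · subst h20; decide
  by_cases h21 : c = 'y'
  · subst h21; decide
  by_cases h22 : c = 'w'
  · subst h22; decide
  have hget : PySem.Dict.get? pvIpaTable c = none := by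
    rw [PySem.Dict.get?, Option.map_eq_none_iff, List.find?_eq_none]
    rintro ⟨k, v⟩ hk
    fin_cases hk <;> simp [beq_iff_eq] <;>
      first | (exact fun e => h0 e.symm) | (exact fun e => h1 e.symm) | (exact fun e => h2 e.symm) | (exact fun e => h3 e.symm) | (exact fun e => h4 e.symm) | (exact fun e => h5 e.symm) | (exact fun e => h6 e.symm) | (exact fun e => h7 e.symm) | (exact fun e => h8 e.symm) | (exact fun e => h9 e.symm) | (exact fun e => h10 e.symm) | (exact fun e => h11 e.symm) | (exact fun e => h12 e.symm) | (exact fun e => h13 e.symm) | (exact fun e => h14 e.symm) | (exact fun e => h15 e.symm) | (exact fun e => h16 e.symm) | (exact fun e => h17 e.symm) | (exact fun e => h18 e.symm) | (exact fun e => h19 e.symm) | (exact fun e => h20 e.symm) | (exact fun e => h21 e.symm) | (exact fun e => h22 e.symm)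
  simp [pvChainL, hget, String.toList_singleton, h0, h1, h2, h3, h4, h5, h6, h7, h8, h9, h10, h11, h12, h13, h14, h15, h16, h17, h18, h19, h20, h21, h22]

theorem pv_translate_toList (s : String) :
    (replace_ipa s).toList = (pvTranslate s).toList := by
  rw [replace_ipa_toList_chain, pvTranslate, String.toList_ofList]
  induction s.toList with
  | nil => simp [pvChainL]
  | cons c t ih =>
    have : c :: t = [c] ++ t := rfl
    rw [this, pvChainL_append, pvChainL_single, List.flatMap_append, ← ih]
    simp

-- ---- replace_letter = the two scans ----

-- the per-character maps of the single-character stages, combined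
def pvDropHH (l : List Char) : List Char :=
  l.flatMap (fun x => if x = 'h' ∨ x = 'H' then [] else [x])

def pvG1 (x : Char) : List Char :=
  if x = ' ' then ['_'] else if x = 'a' then ['á'] else if x = 'e' then ['é'] else [x]

def pvG2 (x : Char) : List Char :=
  if x = 'i' then ['í'] else if x = 'o' then ['ó'] else if x = 'u' then ['ú'] else [x]

def pvG (x : Char) : List Char :=
  if x = ' ' then ['_'] else if x = 'a' then ['á'] else if x = 'e' then ['é']
  else if x = 'i' then ['í'] else if x = 'o' then ['ó'] else if x = 'u' then ['ú'] else [x]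

theorem pv_hH_combine (l : List Char) :
    (l.flatMap (fun x => if x = 'h' then ([] : List Char) else [x])).flatMap
      (fun x => if x = 'H' then ([] : List Char) else [x]) = pvDropHH l := by
  induction l with
  | nil => rfl
  | cons x t ih =>
    simp only [List.flatMap_cons, List.flatMap_append, pvDropHH] at *
    by_cases h1 : x = 'h'
    · simp [h1, ih]
    · by_cases h2 : x = 'H' <;> simp [h1, h2, ih]

theorem pv_g1_combine (l : List Char) :
    ((l.flatMap (fun x => if x = ' ' then ("_" : String).toList else [x])).flatMap
      (fun x => if x = 'a' then ("á" : String).toList else [x])).flatMap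
      (fun x => if x = 'e' then ("é" : String).toList else [x]) = l.flatMap pvG1 := by
  induction l with
  | nil => rfl
  | cons x t ih =>
    simp only [List.flatMap_cons, List.flatMap_append] at *
    rw [ih]
    by_cases h1 : x = ' '
    · subst h1; rfl
    · by_cases h2 : x = 'a'
      · subst h2; rfl
      · by_cases h3 : x = 'e'
        · subst h3; rfl
        · simp [pvG1, h1, h2, h3]

theorem pv_g2_combine (l : List Char) :
    ((l.flatMap (fun x => if x = 'i' then ("í" : String).toList else [x])).flatMap
      (fun x => if x = 'o' then ("ó" : String).toList else [x])).flatMap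
      (fun x => if x = 'u' then ("ú" : String).toList else [x]) = l.flatMap pvG2 := by
  induction l with
  | nil => rfl
  | cons x t ih =>
    simp only [List.flatMap_cons, List.flatMap_append] at *
    rw [ih]
    by_cases h1 : x = 'i'
    · subst h1; rfl
    · by_cases h2 : x = 'o'
      · subst h2; rfl
      · by_cases h3 : x = 'u'
        · subst h3; rfl
        · simp [pvG2, h1, h2, h3]

theorem pv_g1_g2 (l : List Char) :
    (l.flatMap pvG1).flatMap pvG2 = l.flatMap pvG := by
  induction l with
  | nil => rfl
  | cons x t ih =>
    simp only [List.flatMap_cons, List.flatMap_append]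
    rw [ih]
    congr 1
    by_cases h1 : x = ' '
    · subst h1; rfl
    · by_cases h2 : x = 'a'
      · subst h2; rfl
      · by_cases h3 : x = 'e'
        · subst h3; rfl
        · by_cases h4 : x = 'i'
          · subst h4; rfl
          · by_cases h5 : x = 'o'
            · subst h5; rfl
            · by_cases h6 : x = 'u'
              · subst h6; rfl
              · simp [pvG1, pvG2, pvG, h1, h2, h3, h4, h5, h6]

-- no space survives the space stage, so the 'y ' stage is dead
theorem pv_no_space (l : List Char) : ' ' ∉ l.flatMap pvG1 := by
  intro hmem
  obtain ⟨x, -, hx⟩ := List.mem_flatMap.mp hmem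
  unfold pvG1 at hx
  split_ifs at hx with h1 h2 h3 <;> simp only [List.mem_singleton] at hx <;>
    first | exact absurd hx (by decide) | exact h1 hx.symm

theorem pv_rep2_of_not_mem (c1 c2 : Char) (r : List Char) :
    ∀ l : List Char, c2 ∉ l → pvRep2 c1 c2 r l = l
  | [], _ => rfl
  | [x], _ => rfl
  | x :: y :: t, h => by
    have hy : y ≠ c2 := fun e => h (by simp [e])
    rw [pvRep2, if_neg (fun hc => hy hc.2),
      pv_rep2_of_not_mem c1 c2 r (y :: t) (fun hm => h (List.mem_cons_of_mem x hm))]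

-- the VOWEL dict lookup, pointwise
theorem pv_vowel_single (c : Char) :
    ((PySem.Dict.get? pvVowelTable c).getD (String.singleton c)).toList = pvG c := by
  by_cases h1 : c = ' '
  · subst h1; decide
  by_cases h2 : c = 'a'
  · subst h2; decide
  by_cases h3 : c = 'e'
  · subst h3; decide
  by_cases h4 : c = 'i'
  · subst h4; decide
  by_cases h5 : c = 'o'
  · subst h5; decide
  by_cases h6 : c = 'u'
  · subst h6; decide
  have hget : PySem.Dict.get? pvVowelTable c = none := by
    rw [PySem.Dict.get?, Option.map_eq_none_iff, List.find?_eq_none]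
    rintro ⟨k, v⟩ hk
    fin_cases hk <;> simp [beq_iff_eq] <;>
      first | (exact fun e => h1 e.symm) | (exact fun e => h2 e.symm) | (exact fun e => h3 e.symm) | (exact fun e => h4 e.symm) | (exact fun e => h5 e.symm) | (exact fun e => h6 e.symm)
  simp [pvG, hget, String.toList_singleton, h1, h2, h3, h4, h5, h6]

-- scan 1 is exactly: 'ch'->'Ç' (a lookahead pass), then drop the remaining h/H
theorem pv_scan1_eq : ∀ (l : List Char),
    pvScan1 l = pvDropHH (pvRep2 'c' 'h' ['Ç'] l)
  | [] => rfl
  | [c] => by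
    rw [pvScan1, pvRep2]
    by_cases h : c = 'h' ∨ c = 'H' <;> simp [pvDropHH, h]
  | c :: d :: t => by
    by_cases hcd : c = 'c' ∧ d = 'h'
    · obtain ⟨hc, hd⟩ := hcd
      subst hc; subst hd
      rw [pvScan1, if_pos ⟨rfl, rfl⟩, pvRep2, if_pos ⟨rfl, rfl⟩]
      simp only [pvDropHH, List.flatMap_append]
      rw [pv_scan1_eq t]
      rfl
    · by_cases hhH : c = 'h' ∨ c = 'H'
      · rw [pvScan1, if_neg hcd, if_pos hhH, pvRep2, if_neg hcd]
        simp only [pvDropHH, List.flatMap_cons]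
        rw [pv_scan1_eq (d :: t), if_pos hhH]
        rfl
      · rw [pvScan1, if_neg hcd, if_neg hhH, pvRep2, if_neg hcd]
        simp only [pvDropHH, List.flatMap_cons]
        rw [pv_scan1_eq (d :: t), if_neg hhH]
        rfl

-- scan 2 is exactly: '; '->' - ' (a lookahead pass), then the combined char map
theorem pv_scan2_eq : ∀ (l : List Char),
    pvScan2 l = (pvRep2 ';' ' ' (" - " : String).toList l).flatMap pvG
  | [] => rfl
  | [c] => by
    rw [pvScan2, pvRep2, pv_vowel_single]
    simp
  | c :: d :: t => by
    by_cases hcd : c = ';' ∧ d = ' '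
    · obtain ⟨hc, hd⟩ := hcd
      subst hc; subst hd
      rw [pvScan2, if_pos ⟨rfl, rfl⟩, pvRep2, if_pos ⟨rfl, rfl⟩]
      simp only [List.flatMap_append]
      rw [← pv_scan2_eq t]
      rfl
    · rw [pvScan2, if_neg hcd, pvRep2, if_neg hcd]
      simp only [List.flatMap_cons]
      rw [← pv_scan2_eq (d :: t), pv_vowel_single]

-- the main letter lemma: A's 11 staged replaces = B's two scans
theorem pv_replace_letter_eq (s : String) : replace_letter s = pvFixSpanish s := by
  rw [pvFixSpanish]
  apply String.toList_inj.mp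
  rw [String.toList_ofList, replace_letter]
  rw [pv_str_replace_single _ "u" "ú" 'u' rfl]
  rw [pv_str_replace_single _ "o" "ó" 'o' rfl]
  rw [pv_str_replace_single _ "i" "í" 'i' rfl]
  rw [pv_str_replace_two _ "y " "í " 'y' ' ' rfl]
  rw [pv_str_replace_single _ "e" "é" 'e' rfl]
  rw [pv_str_replace_single _ "a" "á" 'a' rfl]
  rw [pv_str_replace_single _ " " "_" ' ' rfl]
  rw [pv_str_replace_two _ "; " " - " ';' ' ' rfl]
  rw [pv_str_replace_single _ "H" "" 'H' rfl]
  rw [pv_str_replace_single _ "h" "" 'h' rfl]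
  rw [pv_str_replace_two _ "ch" "Ç" 'c' 'h' rfl]
  rw [show ("" : String).toList = ([] : List Char) from rfl]
  rw [pv_hH_combine, pv_g1_combine]
  rw [pv_rep2_of_not_mem 'y' ' ' _ _ (pv_no_space _)]
  rw [pv_g2_combine, pv_g1_g2]
  rw [pv_scan2_eq, pv_scan1_eq]
  rfl

-- ---- the driver loops of A, characterized ----

-- First driver loop: a fold of single-index updates at distinct in-range indices.
theorem pv_loop1 (g : String → String) (ks : List Int) (ls : List String)
    (hnd : ks.Nodup) (hr : ∀ k ∈ ks, 0 ≤ k ∧ k.toNat < ls.length) :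
    (ks.foldl (fun acc k => acc.set k.toNat (g (PySem.List.pyGetD acc k ""))) ls).length = ls.length ∧
    ∀ i : Nat, (ks.foldl (fun acc k => acc.set k.toNat (g (PySem.List.pyGetD acc k ""))) ls)[i]?
      = if (i : Int) ∈ ks then (ls[i]?).map g else ls[i]? := by
  induction ks using List.reverseRecOn with
  | nil => simp
  | append_singleton ks' k ih =>
    obtain ⟨hnd', -, hdisj⟩ := List.nodup_append.mp hnd
    have hknot : k ∉ ks' := fun h => hdisj k h k (List.mem_singleton_self k) rfl
    have hr' : ∀ x ∈ ks', 0 ≤ x ∧ x.toNat < ls.length :=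
      fun x hx => hr x (List.mem_append_left _ hx)
    obtain ⟨hk0, hklt⟩ := hr k (List.mem_append_right _ (List.mem_singleton_self k))
    obtain ⟨ihlen, ihget⟩ := ih hnd' hr'
    rw [List.foldl_append]
    set r' := ks'.foldl (fun acc k => acc.set k.toNat (g (PySem.List.pyGetD acc k ""))) ls with hr'def
    have hcast : ((k.toNat : Nat) : Int) = k := Int.toNat_of_nonneg hk0
    have hval : PySem.List.pyGetD r' k "" = ls[k.toNat] := by
      rw [PySem.List.pyGetD_of_nonneg r' "" hk0, List.getD_eq_getElem?_getD, ihget k.toNat,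
        if_neg (by rw [hcast]; exact hknot), List.getElem?_eq_getElem hklt]
      rfl
    simp only [List.foldl_cons, List.foldl_nil, hval]
    constructor
    · simpa using ihlen
    · intro i
      rw [List.getElem?_set]
      by_cases hik : k.toNat = i
      · subst hik
        rw [if_pos rfl, if_pos (by rw [ihlen]; exact hklt),
          if_pos (by rw [hcast] at *; exact List.mem_append_right _ (List.mem_singleton_self k)),
          List.getElem?_eq_getElem hklt]
        rfl
      · rw [if_neg hik, ihget i]
        have : ((i : Int) ∈ ks' ++ [k]) ↔ (i : Int) ∈ ks' := by
          simp only [List.mem_append, List.mem_singleton]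
          constructor
          · rintro (h | h)
            · exact h
            · exact absurd (by omega : k.toNat = i) hik
          · exact Or.inl
        rw [if_congr this rfl rfl]

-- Second driver loop: same, with a running counter j threaded through the state.
theorem pv_loop2 (F : Int → String → String) (ks : List Int) (ls : List String) (j0 : Int)
    (hnd : ks.Nodup) (hr : ∀ k ∈ ks, 0 ≤ k ∧ k.toNat < ls.length) :
    (ks.foldl (fun (st : List String × Int) k =>
        (st.1.set k.toNat (F st.2 (PySem.List.pyGetD st.1 k "")), st.2 + 1)) (ls, j0)).2
      = j0 + ks.length ∧
    (ks.foldl (fun (st : List String × Int) k =>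
        (st.1.set k.toNat (F st.2 (PySem.List.pyGetD st.1 k "")), st.2 + 1)) (ls, j0)).1.length
      = ls.length ∧
    (∀ i : Nat, (i : Int) ∉ ks →
      (ks.foldl (fun (st : List String × Int) k =>
        (st.1.set k.toNat (F st.2 (PySem.List.pyGetD st.1 k "")), st.2 + 1)) (ls, j0)).1[i]?
      = ls[i]?) ∧
    ∀ j : Nat, (hj : j < ks.length) →
      (ks.foldl (fun (st : List String × Int) k =>
        (st.1.set k.toNat (F st.2 (PySem.List.pyGetD st.1 k "")), st.2 + 1)) (ls, j0)).1[(ks[j]).toNat]?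
      = (ls[(ks[j]).toNat]?).map (F (j0 + j)) := by
  induction ks using List.reverseRecOn with
  | nil => simp
  | append_singleton ks' k ih =>
    obtain ⟨hnd', -, hdisj⟩ := List.nodup_append.mp hnd
    have hknot : k ∉ ks' := fun h => hdisj k h k (List.mem_singleton_self k) rfl
    have hr' : ∀ x ∈ ks', 0 ≤ x ∧ x.toNat < ls.length :=
      fun x hx => hr x (List.mem_append_left _ hx)
    obtain ⟨hk0, hklt⟩ := hr k (List.mem_append_right _ (List.mem_singleton_self k))
    obtain ⟨ihj, ihlen, ihout, ihin⟩ := ih hnd' hr'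
    rw [List.foldl_append]
    set st' := ks'.foldl (fun (st : List String × Int) k =>
        (st.1.set k.toNat (F st.2 (PySem.List.pyGetD st.1 k "")), st.2 + 1)) (ls, j0) with hstdef
    have hcast : ((k.toNat : Nat) : Int) = k := Int.toNat_of_nonneg hk0
    have hval : PySem.List.pyGetD st'.1 k "" = ls[k.toNat] := by
      rw [PySem.List.pyGetD_of_nonneg st'.1 "" hk0, List.getD_eq_getElem?_getD,
        ihout k.toNat (by rw [hcast]; exact hknot), List.getElem?_eq_getElem hklt]
      rfl
    simp only [List.foldl_cons, List.foldl_nil, hval]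
    refine ⟨by simp [ihj]; ring, by simpa using ihlen, ?_, ?_⟩
    · intro i hi
      have hik : k.toNat ≠ i := by
        intro h; exact hi (by rw [← h, hcast]; exact List.mem_append_right _ (List.mem_singleton_self k))
      rw [List.getElem?_set, if_neg hik]
      exact ihout i (fun h => hi (List.mem_append_left _ h))
    · intro j hj
      rw [List.length_append, List.length_singleton] at hj
      by_cases hjl : j < ks'.length
      · have hkj : (ks' ++ [k])[j] = ks'[j] := List.getElem_append_left hjl
        rw [hkj]
        obtain ⟨hj0, hjlt⟩ := hr' ks'[j] (List.getElem_mem hjl)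
        have hne : k.toNat ≠ (ks'[j]).toNat := by
          intro h
          exact hknot (by rw [show k = ks'[j] by omega]; exact List.getElem_mem hjl)
        rw [List.getElem?_set, if_neg hne]
        exact ihin j hjl
      · have hjeq : j = ks'.length := by omega
        subst hjeq
        have hkj : (ks' ++ [k])[ks'.length] = k := by
          rw [List.getElem_append_right (le_refl ks'.length)]
          simp
        rw [hkj, List.getElem?_set, if_pos rfl, if_pos (by rw [ihlen]; exact hklt),
          List.getElem?_eq_getElem hklt, ihj]
        rfl

-- A's second-loop update function (what the fold applies at index k with counter j)
def pvF (ipa : List String) (j : Int) (s : String) : String :=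
  "[" ++ s ++ "] [" ++ PySem.Str.join "_" (s.toList.map String.singleton) ++ "] "
    ++ PySem.Str.join " " ((replace_ipa (PySem.List.pyGetD ipa j "")).toList.map String.singleton)

theorem pv_F_eq_en (ipa : List String) (m : Nat) (s : String) :
    pvF ipa (0 + (m : Int)) s = pvFmtEnglish s (PySem.List.pyGetD ipa (m : Int) "") := by
  unfold pvF pvFmtEnglish
  rw [show ((0:Int) + (m:Int)) = (m:Int) by ring, pv_translate_toList]

-- the port's loops, characterized (defeq instances of pv_loop1 / pv_loop2)
theorem pv_loop1_port (ks : List Int) (ls : List String) (hnd : ks.Nodup)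
    (hr : ∀ k ∈ ks, 0 ≤ k ∧ k.toNat < ls.length) :
    (ks.foldl (fun ls k => ls.set k.toNat ("[" ++ replace_letter (PySem.List.pyGetD ls k "") ++ "]")) ls).length = ls.length ∧
    ∀ i : Nat, (ks.foldl (fun ls k => ls.set k.toNat ("[" ++ replace_letter (PySem.List.pyGetD ls k "") ++ "]")) ls)[i]?
      = if (i : Int) ∈ ks then (ls[i]?).map (fun s => "[" ++ replace_letter s ++ "]") else ls[i]? :=
  pv_loop1 (fun s => "[" ++ replace_letter s ++ "]") ks ls hnd hr

theorem pv_loop2_port (ipa : List String) (ks : List Int) (ls : List String) (hnd : ks.Nodup)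
    (hr : ∀ k ∈ ks, 0 ≤ k ∧ k.toNat < ls.length) :
    (ks.foldl (fun (st : List String × Int) k =>
      (st.1.set k.toNat
        ("[" ++ PySem.List.pyGetD st.1 k "" ++ "] ["
          ++ PySem.Str.join "_" ((PySem.List.pyGetD st.1 k "").toList.map String.singleton)
          ++ "] "
          ++ PySem.Str.join " " ((replace_ipa (PySem.List.pyGetD ipa st.2 "")).toList.map String.singleton)),
       st.2 + 1)) (ls, (0:Int))).1.length = ls.length ∧
    (∀ i : Nat, (i : Int) ∉ ks →
      (ks.foldl (fun (st : List String × Int) k =>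
      (st.1.set k.toNat
        ("[" ++ PySem.List.pyGetD st.1 k "" ++ "] ["
          ++ PySem.Str.join "_" ((PySem.List.pyGetD st.1 k "").toList.map String.singleton)
          ++ "] "
          ++ PySem.Str.join " " ((replace_ipa (PySem.List.pyGetD ipa st.2 "")).toList.map String.singleton)),
       st.2 + 1)) (ls, (0:Int))).1[i]? = ls[i]?) ∧
    ∀ j : Nat, (hj : j < ks.length) →
      (ks.foldl (fun (st : List String × Int) k =>
      (st.1.set k.toNat
        ("[" ++ PySem.List.pyGetD st.1 k "" ++ "] ["
          ++ PySem.Str.join "_" ((PySem.List.pyGetD st.1 k "").toList.map String.singleton)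
          ++ "] "
          ++ PySem.Str.join " " ((replace_ipa (PySem.List.pyGetD ipa st.2 "")).toList.map String.singleton)),
       st.2 + 1)) (ls, (0:Int))).1[(ks[j]).toNat]?
      = (ls[(ks[j]).toNat]?).map (pvF ipa (0 + j)) :=
  ⟨(pv_loop2 (pvF ipa) ks ls 0 hnd hr).2.1,
   (pv_loop2 (pvF ipa) ks ls 0 hnd hr).2.2.1,
   (pv_loop2 (pvF ipa) ks ls 0 hnd hr).2.2.2⟩

theorem pv_range2_get (n : Int) (i : Nat) (hi : (i : Int) < n) (hpar : i % 2 = 0) :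
    ∃ hj : i / 2 < (PySem.List.pyRange 0 n 2).length,
      (PySem.List.pyRange 0 n 2)[i / 2]'hj = (i : Int) := by
  rw [PySem.List.pyRange_of_pos _ _ (by norm_num : (0:Int) < 2)]
  have h0n : (0:Int) < n := by omega
  rw [if_pos h0n]
  have hlt : i / 2 < ((n - 0 + 2 - 1) / 2).toNat := by omega
  refine ⟨by simpa using hlt, ?_⟩
  simp only [List.getElem_map, List.getElem_range]
  omega

-- B's elementwise function, at a natural index
theorem pv_alt_getElem? (lines ipa : List String) (i : Nat) (hi : i < lines.length) :
    (replace_spanish_letter_alt lines ipa)[i]?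
      = some (if i % 2 = 0 then
          pvFmtEnglish lines[i] (PySem.List.pyGetD ipa ((i / 2 : Nat) : Int) "")
        else "[" ++ pvFixSpanish lines[i] ++ "]") := by
  rw [replace_spanish_letter_alt, List.getElem?_map, PySem.List.getElem?_enumerate,
    List.getElem?_eq_getElem hi]
  simp only [Option.map_some]
  congr 1
  have hmod : PySem.Int.mod ((0 : Int) + (i : Int)) 2 = ((i % 2 : Nat) : Int) := by
    simp [PySem.Int.mod, Int.fmod_eq_emod]
  have hdiv : PySem.Int.floordiv ((0 : Int) + (i : Int)) 2 = ((i / 2 : Nat) : Int) := by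
    simp [PySem.Int.floordiv, Int.fdiv_eq_ediv]
  rw [hmod, hdiv]
  by_cases hpar : i % 2 = 0
  · rw [if_pos hpar, if_pos (by simp [hpar])]
  · rw [if_neg hpar, if_neg (by simp; omega)]

-- ===== VERDICT =====
theorem replace_spanish_letter_spec : Claim_equal_replace_spanish_letter := by
  intro lines ipa hdom hpre
  unfold Spec_replace_spanish_letter
  unfold replace_spanish_letter
  dsimp only
  have h2 : (0:Int) < 2 := by norm_num
  -- characterize the first loop
  have hnd1 : (PySem.List.pyRange 1 (lines.length : Int) 2).Nodup := by
    rw [PySem.List.pyRange_of_pos _ _ h2]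
    refine List.Nodup.map ?_ List.nodup_range
    intro a b hab
    simp only at hab
    omega
  have hr1 : ∀ k ∈ PySem.List.pyRange 1 (lines.length : Int) 2,
      0 ≤ k ∧ k.toNat < lines.length := by
    intro k hk
    rw [PySem.List.mem_pyRange_iff_of_pos h2] at hk
    omega
  obtain ⟨hlen1, hget1⟩ :=
    pv_loop1_port (PySem.List.pyRange 1 (lines.length : Int) 2) lines hnd1 hr1
  set L1 := (PySem.List.pyRange 1 (lines.length : Int) 2).foldl
    (fun ls k => ls.set k.toNat ("[" ++ replace_letter (PySem.List.pyGetD ls k "") ++ "]"))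
    lines with hL1
  rw [hlen1]
  -- characterize the second loop
  have hnd2 : (PySem.List.pyRange 0 (lines.length : Int) 2).Nodup := by
    rw [PySem.List.pyRange_of_pos _ _ h2]
    refine List.Nodup.map ?_ List.nodup_range
    intro a b hab
    simp only at hab
    omega
  have hr2 : ∀ k ∈ PySem.List.pyRange 0 (lines.length : Int) 2,
      0 ≤ k ∧ k.toNat < L1.length := by
    intro k hk
    rw [PySem.List.mem_pyRange_iff_of_pos h2] at hk
    rw [hlen1]
    omega
  obtain ⟨hlen2, hout2, hin2⟩ :=
    pv_loop2_port ipa (PySem.List.pyRange 0 (lines.length : Int) 2) L1 hnd2 hr2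
  apply List.ext_getElem?
  intro i
  by_cases hi : i < lines.length
  · rw [pv_alt_getElem? lines ipa i hi]
    by_cases hpar : i % 2 = 0
    · -- even index: set by the second loop
      obtain ⟨hj, hkj⟩ := pv_range2_get (lines.length : Int) i (by exact_mod_cast hi) hpar
      have h := hin2 (i / 2) hj
      rw [hkj] at h
      simp only [Int.toNat_natCast] at h
      have hnotks1 : ((i : Int)) ∉ PySem.List.pyRange 1 (lines.length : Int) 2 := by
        rw [PySem.List.mem_pyRange_iff_of_pos h2]
        omega
      rw [hget1 i, if_neg hnotks1, List.getElem?_eq_getElem hi] at h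
      rw [h, if_pos hpar]
      simp only [Option.map_some]
      rw [pv_F_eq_en]
    · -- odd index: set by the first loop, untouched by the second
      have hnotks2 : ((i : Int)) ∉ PySem.List.pyRange 0 (lines.length : Int) 2 := by
        rw [PySem.List.mem_pyRange_iff_of_pos h2]
        omega
      have hks1 : ((i : Int)) ∈ PySem.List.pyRange 1 (lines.length : Int) 2 := by
        rw [PySem.List.mem_pyRange_iff_of_pos h2]
        omega
      rw [hout2 i hnotks2, hget1 i, if_pos hks1, List.getElem?_eq_getElem hi]
      rw [if_neg hpar]
      simp only [Option.map_some]
      rw [pv_replace_letter_eq]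
  · rw [List.getElem?_eq_none, List.getElem?_eq_none]
    · rw [replace_spanish_letter_alt, List.length_map, PySem.List.length_enumerate]
      omega
    · rw [hlen2, hlen1]
      omega
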